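-- pv_equiv track=rewrite | github.com/XcapeAxis/BalatroAI | trainer/record_real_session.py | _occurrence_tokens
-- ===== SOURCE A (Python) =====
-- def _occurrence_tokens(keys: list[str]) -> list[str]:
--     counts: dict[str, int] = {}
--     tokens: list[str] = []
--     for raw in keys:
--         key = str(raw or "").strip().lower()
--         if not key:
--             key = "__empty__"
--         seen = int(counts.get(key) or 0)
--         counts[key] = seen + 1
--         tokens.append(f"{key}#{seen}")
--     return tokens
-- ===== SOURCE B (Python) =====
-- def _occurrence_tokens(keys: list[str]) -> list[str]:
--     normalized = []
--     for raw in keys: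
--         key = str(raw or "").strip().lower()
--         normalized.append(key if key else "__empty__")
--     return [f"{key}#{normalized[:i].count(key)}" for i, key in enumerate(normalized)]
-- ===== Notes on version B (the rewrite author's own statement) =====
-- stated objective: alternative
-- what changed: Replaced the single pass with a running-counts dict by a two-phase formulation: first normalize all keys, then label each position by counting its occurrences among the strictly earlier normalized keys.
import Mathlib
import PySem

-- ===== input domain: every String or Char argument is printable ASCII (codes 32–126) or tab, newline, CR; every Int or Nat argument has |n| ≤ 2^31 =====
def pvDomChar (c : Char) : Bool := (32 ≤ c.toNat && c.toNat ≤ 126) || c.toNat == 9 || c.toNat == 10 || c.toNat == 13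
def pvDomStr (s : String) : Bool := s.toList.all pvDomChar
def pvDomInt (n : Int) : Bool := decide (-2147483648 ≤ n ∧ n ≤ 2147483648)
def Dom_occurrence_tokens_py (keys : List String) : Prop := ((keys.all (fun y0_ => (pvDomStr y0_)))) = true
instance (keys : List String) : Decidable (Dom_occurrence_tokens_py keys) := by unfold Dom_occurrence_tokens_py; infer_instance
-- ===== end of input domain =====

-- B labels each key with its occurrence index by counting equal entries among the earlier
-- normalized keys instead of carrying A's running-count dictionary; same value, alternative shape.

-- shared normalization line: str(raw or "").strip().lower(), "__empty__" when empty
def pvNorm (raw : String) : String :=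
  let key := PySem.Str.lower (PySem.Str.strip (if raw = "" then "" else raw))
  if key = "" then "__empty__" else key

-- ===== PORT A =====
-- seen = int(counts.get(key) or 0)   ('x or 0' maps None to 0 and a falsy 0 to 0)
def pvSeen (counts : PySem.Dict String Int) (key : String) : Int :=
  match counts.get? key with
  | none => 0
  | some v => if v = 0 then 0 else v

def occurrence_tokens_py (keys : List String) : List String :=
  (keys.foldl (fun (st : PySem.Dict String Int × List String) raw =>
      let key := pvNorm raw
      let seen : Int := pvSeen st.1 key
      (st.1.insert key (seen + 1), st.2 ++ [key ++ "#" ++ PySem.Int.toStr seen]))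
    (PySem.Dict.empty, [])).2

-- ===== PORT B =====
def occurrence_tokens_py_alt (keys : List String) : List String :=
  let normalized := keys.map pvNorm
  (PySem.List.enumerate normalized).map (fun p =>
    p.2 ++ "#" ++ PySem.Int.toStr
      (PySem.List.count (PySem.List.slice normalized none (some p.1)) p.2))

-- ===== PRECONDITION & SPEC =====
def Spec_occurrence_tokens_py (keys : List String) (out : List String) : Prop := out = occurrence_tokens_py_alt keys
instance (keys : List String) (out : List String) : Decidable (Spec_occurrence_tokens_py keys out) := by unfold Spec_occurrence_tokens_py; infer_instance

-- ===== CLAIM (what is proved, stated in full; the proofs are below) =====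
def Claim_equal_occurrence_tokens_py : Prop := ∀ (keys : List String), Dom_occurrence_tokens_py keys → Spec_occurrence_tokens_py keys (occurrence_tokens_py keys)

-- ===== LEMMAS AND PROOFS =====

-- common characterisation: token list over normalized keys, counting within the prefix processed so far
def pvGo (pre : List String) : List String → List String
  | [] => []
  | k :: rest => (k ++ "#" ++ PySem.Int.toStr (List.count k pre)) :: pvGo (pre ++ [k]) rest

theorem pvSeen_eq (d : PySem.Dict String Int) (pre : List String) (key : String)
    (h : d.getD key 0 = (List.count key pre : Int)) :
    pvSeen d key = (List.count key pre : Int) := by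
  rw [PySem.Dict.getD_eq_get?_getD] at h
  unfold pvSeen
  cases hg : d.get? key with
  | none => rw [hg] at h; simp only [Option.getD_none] at h; omega
  | some v =>
    rw [hg] at h
    simp only [Option.getD_some] at h
    show (if v = 0 then (0:Int) else v) = (List.count key pre : Int)
    split <;> omega

theorem pvA_eq_go : ∀ (l : List String) (d : PySem.Dict String Int) (acc pre : List String),
    (∀ k, d.getD k 0 = (List.count k pre : Int)) →
    (l.foldl (fun (st : PySem.Dict String Int × List String) raw =>
        let key := pvNorm raw
        let seen : Int := pvSeen st.1 key
        (st.1.insert key (seen + 1), st.2 ++ [key ++ "#" ++ PySem.Int.toStr seen]))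
      (d, acc)).2 = acc ++ pvGo pre (l.map pvNorm)
  | [], d, acc, pre, h => by simp [pvGo]
  | raw :: rest, d, acc, pre, h => by
    simp only [List.foldl_cons, List.map_cons]
    generalize pvNorm raw = x
    have hseen : pvSeen d x = (List.count x pre : Int) := pvSeen_eq d pre x (h x)
    have hinv : ∀ k, (d.insert x ((List.count x pre : Int) + 1)).getD k 0
        = (List.count k (pre ++ [x]) : Int) := by
      intro k
      rw [PySem.Dict.getD_insert]
      by_cases hk : k = x
      · subst hk; simp [List.count_append]
      · rw [if_neg hk, h k]
        have h0 : List.count k [x] = 0 := by simp [Ne.symm hk]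
        simp [List.count_append, h0]
    rw [hseen, pvA_eq_go rest (d.insert x ((List.count x pre : Int) + 1))
      (acc ++ [x ++ "#" ++ PySem.Int.toStr (List.count x pre : Int)])
      (pre ++ [x]) hinv]
    simp [pvGo]

theorem pvB_eq_go : ∀ (rest pre n : List String), n = pre ++ rest →
    (PySem.List.enumerate rest (pre.length : Int)).map (fun p =>
      p.2 ++ "#" ++ PySem.Int.toStr
        (PySem.List.count (PySem.List.slice n none (some p.1)) p.2)) = pvGo pre rest
  | [], pre, n, hn => by simp [pvGo, PySem.List.enumerate_nil]
  | k :: rest, pre, n, hn => by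
    rw [PySem.List.enumerate_cons, List.map_cons]
    have hslice : PySem.List.slice n none (some (pre.length : Int)) = pre := by
      rw [PySem.List.slice_to n (Int.natCast_nonneg _)]
      simp [hn]
    have htail : ((pre.length : Int) + 1) = (((pre ++ [k]).length : Nat) : Int) := by
      simp
    rw [hslice, htail, pvB_eq_go rest (pre ++ [k]) n (by simp [hn])]
    simp [pvGo, PySem.List.count_eq]

-- ===== VERDICT (by name: the statement is the Claim_ definition above) =====
theorem occurrence_tokens_py_spec : Claim_equal_occurrence_tokens_py := by
  intro keys _
  show occurrence_tokens_py keys = occurrence_tokens_py_alt keys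
  unfold occurrence_tokens_py occurrence_tokens_py_alt
  have ha := pvA_eq_go keys PySem.Dict.empty [] []
    (fun k => by simp [PySem.Dict.getD_empty])
  have hb := pvB_eq_go (keys.map pvNorm) [] (keys.map pvNorm) (by simp)
  simp only [List.length_nil, Nat.cast_zero, List.nil_append] at ha hb
  rw [ha, ← hb]
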